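-- pv_equiv track=rewrite | github.com/janu6ram/CP-Problems | 09-hasconsecutivedigits-Python/hasconsecutivedigits.py | hasconsecutivedigits
-- ===== SOURCE A (Python) =====
-- def hasconsecutivedigits(n):
--     # your code goes here
--     num = abs(n)
--     num_st = str(num)
--     num_list = list(num_st)
--     for i in range(len(num_list)-1):
--         if int(num_list[i]) + 1 == int(num_list[i+1]):
--             return True
--     return False
-- ===== SOURCE B (Python) =====
-- def hasconsecutivedigits(n):
--     s = str(abs(n))
--     return any(p in s for p in ("01", "12", "23", "34", "45", "56", "67", "78", "89"))
-- ===== Notes on version B (the rewrite author's own statement) =====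
-- stated objective: idiomatic
-- what changed: Replaces the index loop that compares int(digit[i])+1 == int(digit[i+1]) with a fixed table of the nine consecutive-digit pair strings and a substring search (any(p in s)) over str(abs(n)).
import Mathlib
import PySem

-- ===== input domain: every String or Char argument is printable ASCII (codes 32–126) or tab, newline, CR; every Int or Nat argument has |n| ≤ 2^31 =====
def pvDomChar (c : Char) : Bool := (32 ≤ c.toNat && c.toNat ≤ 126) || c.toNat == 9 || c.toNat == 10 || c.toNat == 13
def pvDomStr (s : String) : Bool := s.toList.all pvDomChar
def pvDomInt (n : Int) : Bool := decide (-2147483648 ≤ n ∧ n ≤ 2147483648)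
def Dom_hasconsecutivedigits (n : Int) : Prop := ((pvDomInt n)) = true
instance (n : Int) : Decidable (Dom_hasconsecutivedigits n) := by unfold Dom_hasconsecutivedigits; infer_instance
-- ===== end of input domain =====

-- B replaces A's indexed digit-value comparison loop by a substring search for the nine
-- consecutive-digit pair strings over str(abs(n)) — a more idiomatic table-driven form.


-- ===== PORT A =====
-- int(num_list[i]) is ported as (PySem.Int.ofChars? [c]).getD 0; the indices produced by
-- range(len(num_list)-1) are always in range and the characters are always digits, so
-- neither the pyGetD default nor the getD 0 default is ever reached (Python never raises here).
def hasconsecutivedigits (n : Int) : Bool :=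
  let num : Int := |n|
  let numList : List Char := PySem.Int.toChars num
  (PySem.List.pyRange 0 ((numList.length : Int) - 1) 1).any (fun i =>
    (PySem.Int.ofChars? [PySem.List.pyGetD numList i ' ']).getD 0 + 1
      == (PySem.Int.ofChars? [PySem.List.pyGetD numList (i + 1) ' ']).getD 0)

-- ===== PORT B =====
-- the nine consecutive-digit pair patterns of Source B
def pvPats : List (List Char) :=
  [['0','1'], ['1','2'], ['2','3'], ['3','4'], ['4','5'], ['5','6'], ['6','7'], ['7','8'], ['8','9']]

def hasconsecutivedigits_alt (n : Int) : Bool :=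
  let s : List Char := PySem.Int.toChars |n|
  pvPats.any (fun p => PySem.Chars.isIn p s)

-- ===== PRECONDITION & SPEC =====
def Spec_hasconsecutivedigits (n : Int) (out : Bool) : Prop := out = hasconsecutivedigits_alt n
instance (n : Int) (out : Bool) : Decidable (Spec_hasconsecutivedigits n out) := by unfold Spec_hasconsecutivedigits; infer_instance

-- ===== CLAIM (what is proved, stated in full; the proofs are below) =====
def Claim_equal_hasconsecutivedigits : Prop := ∀ (n : Int), Dom_hasconsecutivedigits n → Spec_hasconsecutivedigits n (hasconsecutivedigits n)

-- ===== LEMMAS AND PROOFS =====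

-- A's per-pair test, abstracted
def pvPairA (a b : Char) : Bool :=
  (PySem.Int.ofChars? [a]).getD 0 + 1 == (PySem.Int.ofChars? [b]).getD 0

-- adjacency recursion both sides reduce to
def pvAdj : List Char → Bool
  | a :: b :: t => pvPairA a b || pvAdj (b :: t)
  | _ => false

def pvDigits : List Char := ['0','1','2','3','4','5','6','7','8','9']

-- every character produced by Nat.toDigitsCore base 10 is a decimal digit
theorem pv_toDigitsCore_digits (fuel : Nat) : ∀ (n : Nat) (ds : List Char),
    (∀ c ∈ ds, c ∈ pvDigits) → ∀ c ∈ Nat.toDigitsCore 10 fuel n ds, c ∈ pvDigits := by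
  induction fuel with
  | zero => intro n ds hds c hc; exact hds c hc
  | succ fuel ih =>
    intro n ds hds c hc
    have hd : (n % 10).digitChar ∈ pvDigits := by
      have h10 : n % 10 < 10 := Nat.mod_lt _ (by omega)
      interval_cases h : (n % 10) <;> decide
    rw [Nat.toDigitsCore] at hc
    by_cases hz : n / 10 = 0
    · simp only [hz, reduceIte] at hc
      rcases List.mem_cons.mp hc with h | h
      · exact h ▸ hd
      · exact hds c h
    · simp only [if_neg hz] at hc
      exact ih _ _ (by
        intro x hx
        rcases List.mem_cons.mp hx with h | h
        · exact h ▸ hd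
        · exact hds x h) c hc

theorem pv_toChars_digits (n : Int) (hn : 0 ≤ n) :
    ∀ c ∈ PySem.Int.toChars n, c ∈ pvDigits := by
  intro c hc
  unfold PySem.Int.toChars at hc
  rw [if_neg (by omega)] at hc
  exact pv_toDigitsCore_digits _ _ [] (by intro x hx; cases hx) c hc

-- a two-character pattern is a prefix of a::b::t iff it names exactly (a, b)
theorem pv_prefix2 (x y a b : Char) (t : List Char) :
    [x, y] <+: a :: b :: t ↔ x = a ∧ y = b := by
  simp [List.cons_prefix_cons]

-- on digit characters, A's arithmetic test agrees with membership in the pattern table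
theorem pv_pair_iff (a b : Char) (ha : a ∈ pvDigits) (hb : b ∈ pvDigits) :
    pvPairA a b = true ↔ [a, b] ∈ pvPats := by
  fin_cases ha <;> fin_cases hb <;> decide

-- B's substring search equals the adjacency recursion on digit strings
theorem pv_B_eq_adj : ∀ (l : List Char), (∀ c ∈ l, c ∈ pvDigits) →
    pvPats.any (fun p => PySem.Chars.isIn p l) = pvAdj l := by
  intro l
  induction l with
  | nil =>
    intro _
    have h : pvPats.any (fun p => PySem.Chars.isIn p []) = false := by decide
    rw [h]; rfl
  | cons a t ih =>
    intro hdig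
    cases t with
    | nil =>
      have h : pvPats.any (fun p => PySem.Chars.isIn p [a]) = false := List.any_eq_false.mpr (by
        intro p hp
        rw [PySem.Chars.isIn_iff_infix]
        intro hinf
        have hlen := hinf.length_le
        have hp2 : p.length = 2 := by fin_cases hp <;> rfl
        simp [hp2] at hlen)
      rw [h]; rfl
    | cons b t' =>
      have ha : a ∈ pvDigits := hdig a (by simp)
      have hb : b ∈ pvDigits := hdig b (by simp)
      have ih' := ih (by intro c hc; exact hdig c (List.mem_cons_of_mem _ hc))
      rw [show pvAdj (a :: b :: t') = (pvPairA a b || pvAdj (b :: t')) from rfl, ← ih']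
      rw [Bool.eq_iff_iff]
      constructor
      · intro hL
        rcases List.any_eq_true.mp hL with ⟨p, hp, hin⟩
        rw [PySem.Chars.isIn_iff_infix] at hin
        rcases List.infix_cons_iff.mp hin with hpre | hinf
        · have hp2 : ∃ x y, p = [x, y] := by fin_cases hp <;> exact ⟨_, _, rfl⟩
          rcases hp2 with ⟨x, y, rfl⟩
          rcases (pv_prefix2 x y a b t').mp hpre with ⟨hx, hy⟩
          rw [hx, hy] at hp
          exact Bool.or_eq_true_iff.mpr (Or.inl ((pv_pair_iff a b ha hb).mpr hp))
        · exact Bool.or_eq_true_iff.mpr (Or.inr (List.any_eq_true.mpr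
            ⟨p, hp, (PySem.Chars.isIn_iff_infix _ _).mpr hinf⟩))
      · intro hR
        rcases Bool.or_eq_true_iff.mp hR with h | h
        · exact List.any_eq_true.mpr ⟨[a, b], (pv_pair_iff a b ha hb).mp h,
            (PySem.Chars.isIn_iff_infix _ _).mpr ((pv_prefix2 a b a b t').mpr ⟨rfl, rfl⟩).isInfix⟩
        · rcases List.any_eq_true.mp h with ⟨p, hp, hin⟩
          exact List.any_eq_true.mpr ⟨p, hp, (PySem.Chars.isIn_iff_infix _ _).mpr
            (List.infix_cons_iff.mpr (Or.inr ((PySem.Chars.isIn_iff_infix _ _).mp hin)))⟩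

-- the Nat-indexed range form of A's loop equals the adjacency recursion
theorem pv_range_eq_adj : ∀ (l : List Char),
    (List.range (l.length - 1)).any (fun k => pvPairA (l.getD k ' ') (l.getD (k + 1) ' ')) = pvAdj l := by
  intro l
  induction l with
  | nil => rfl
  | cons a t ih =>
    cases t with
    | nil => rfl
    | cons b t' =>
      rw [show (a :: b :: t').length - 1 = t'.length + 1 from by simp,
          List.range_succ_eq_map, List.any_cons, List.any_map]
      have hshift : ((fun k => pvPairA ((a :: b :: t').getD k ' ') ((a :: b :: t').getD (k + 1) ' ')) ∘ Nat.succ)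
          = fun k => pvPairA ((b :: t').getD k ' ') ((b :: t').getD (k + 1) ' ') := by
        funext k
        simp [Function.comp, Nat.succ_eq_add_one]
      rw [hshift]
      have ih2 : (List.range t'.length).any
          (fun k => pvPairA ((b :: t').getD k ' ') ((b :: t').getD (k + 1) ' ')) = pvAdj (b :: t') := by
        simpa using ih
      rw [ih2]
      rfl

-- A's pyRange loop, rewritten to the Nat-indexed form
theorem pv_A_eq_adj (l : List Char) :
    (PySem.List.pyRange 0 ((l.length : Int) - 1) 1).any (fun i =>
      (PySem.Int.ofChars? [PySem.List.pyGetD l i ' ']).getD 0 + 1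
        == (PySem.Int.ofChars? [PySem.List.pyGetD l (i + 1) ' ']).getD 0) = pvAdj l := by
  rw [PySem.List.pyRange_one, List.any_map,
      show ((l.length : Int) - 1 - 0).toNat = l.length - 1 from by omega]
  have hβ : ((fun i => (PySem.Int.ofChars? [PySem.List.pyGetD l i ' ']).getD 0 + 1
        == (PySem.Int.ofChars? [PySem.List.pyGetD l (i + 1) ' ']).getD 0) ∘ fun k : Nat => 0 + (k : Int))
      = fun k : Nat => pvPairA (l.getD k ' ') (l.getD (k + 1) ' ') := by
    funext k
    simp only [Function.comp]
    rw [show (0 : Int) + (k : Int) = ((k : Nat) : Int) from by omega]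
    rw [show ((k : Nat) : Int) + 1 = (((k + 1 : Nat)) : Int) from by push_cast; ring]
    rw [PySem.List.pyGetD_natCast, PySem.List.pyGetD_natCast]
    rfl
  rw [hβ, pv_range_eq_adj]

-- ===== VERDICT (by name: the statement is the Claim_ definition above) =====
theorem hasconsecutivedigits_spec : Claim_equal_hasconsecutivedigits := by
  intro n _
  unfold Spec_hasconsecutivedigits hasconsecutivedigits hasconsecutivedigits_alt
  rw [pv_A_eq_adj, pv_B_eq_adj _ (pv_toChars_digits _ (abs_nonneg n))]
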